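-- pv_equiv track=rewrite | github.com/dan-does-code/tg_dl_bot | downloader.py | _estimate_bitrate
-- ===== SOURCE A (Python) =====
-- def _estimate_bitrate(height):
--     """Estimate bitrate based on video height (resolution)"""
--     bitrate_map = {
--         2160: 20000,  # 4K
--         1440: 10000,  # 1440p
--         1080: 5000,   # 1080p
--         720: 2500,    # 720p
--         480: 1200,    # 480p
--         360: 800,     # 360p
--         240: 500,     # 240p
--     }
--
--     # Find closest resolution
--     for res in sorted(bitrate_map.keys(), reverse=True):
--         if height >= res:
--             return bitrate_map[res]
--
--     return 500  # Default for very low quality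
-- ===== SOURCE B (Python) =====
-- import bisect
--
-- _THRESHOLDS = [240, 360, 480, 720, 1080, 1440, 2160]
-- _BITRATES = [500, 800, 1200, 2500, 5000, 10000, 20000]
--
-- def _estimate_bitrate(height):
--     """Estimate bitrate based on video height (resolution)"""
--     idx = bisect.bisect_right(_THRESHOLDS, height) - 1
--     if idx < 0:
--         return 500
--     return _BITRATES[idx]
-- ===== Notes on version B (the rewrite author's own statement) =====
-- stated objective: idiomatic
-- what changed: Replaced the descending linear scan over a rebuilt dict with a binary search (bisect_right) over fixed ascending parallel threshold/bitrate lists.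
import Mathlib
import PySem

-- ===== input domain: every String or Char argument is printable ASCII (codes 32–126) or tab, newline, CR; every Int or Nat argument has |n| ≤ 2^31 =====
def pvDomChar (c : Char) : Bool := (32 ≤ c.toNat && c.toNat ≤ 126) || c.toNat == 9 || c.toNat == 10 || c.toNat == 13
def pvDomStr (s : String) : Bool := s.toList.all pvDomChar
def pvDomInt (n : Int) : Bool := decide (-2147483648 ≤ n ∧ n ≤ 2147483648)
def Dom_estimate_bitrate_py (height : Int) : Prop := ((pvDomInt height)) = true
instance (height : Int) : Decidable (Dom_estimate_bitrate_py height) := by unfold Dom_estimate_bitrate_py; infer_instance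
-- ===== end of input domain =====

-- B replaces A's descending linear scan over a rebuilt dict with a binary search
-- (bisect_right) over fixed ascending parallel threshold/bitrate tables (idiomatic).

-- ===== PORT A =====
-- the dict literal, in insertion order
def ebpBitrateMap : PySem.Dict Int Int :=
  PySem.Dict.ofList [(2160, 20000), (1440, 10000), (1080, 5000), (720, 2500), (480, 1200), (360, 800), (240, 500)]

-- the for-loop: first res in the (reverse-sorted) key list with height ≥ res returns bitrate_map[res]
def ebpLoop (height : Int) : List Int → Int
  | [] => 500
  | res :: rest => if height ≥ res then PySem.Dict.getD ebpBitrateMap res 0 else ebpLoop height rest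

def estimate_bitrate_py (height : Int) : Int :=
  ebpLoop height (PySem.List.sorted (PySem.Dict.keys ebpBitrateMap) id true)

-- ===== PORT B =====
def ebpThresholds : List Int := [240, 360, 480, 720, 1080, 1440, 2160]
def ebpBitrates : List Int := [500, 800, 1200, 2500, 5000, 10000, 20000]

def estimate_bitrate_py_alt (height : Int) : Int :=
  let idx : Int := (PySem.List.bisectRight ebpThresholds height : Int) - 1
  if idx < 0 then 500
  else PySem.List.pyGetD ebpBitrates idx 0

-- ===== PRECONDITION & SPEC =====
def Spec_estimate_bitrate_py (height : Int) (out : Int) : Prop := out = estimate_bitrate_py_alt height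
instance (height : Int) (out : Int) : Decidable (Spec_estimate_bitrate_py height out) := by unfold Spec_estimate_bitrate_py; infer_instance

-- ===== CLAIM (what is proved, stated in full; the proofs are below) =====
def Claim_equal_estimate_bitrate_py : Prop := ∀ (height : Int), Dom_estimate_bitrate_py height → Spec_estimate_bitrate_py height (estimate_bitrate_py height)

-- ===== LEMMAS AND PROOFS =====

-- the reverse-sorted key list of A's dict, evaluated once (all literals)
theorem ebp_keys_sorted :
    PySem.List.sorted (PySem.Dict.keys ebpBitrateMap) id true =
      [2160, 1440, 1080, 720, 480, 360, 240] := by decide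

-- value of B's binary search, characterised per interval via the library spec
theorem ebp_bisect (h : Int) :
    PySem.List.bisectRight ebpThresholds h =
      if 2160 ≤ h then 7 else if 1440 ≤ h then 6 else if 1080 ≤ h then 5
      else if 720 ≤ h then 4 else if 480 ≤ h then 3 else if 360 ≤ h then 2
      else if 240 ≤ h then 1 else 0 := by
  obtain ⟨hle, hlo, hhi⟩ := PySem.List.bisectRight_spec ebpThresholds h (by decide)
  have hle7 : PySem.List.bisectRight ebpThresholds h ≤ 7 := by simpa [ebpThresholds] using hle
  have l0 : 0 < PySem.List.bisectRight ebpThresholds h → 240 ≤ h := fun hh => by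
    simpa [ebpThresholds] using hlo 0 (by decide) hh
  have l1 : 1 < PySem.List.bisectRight ebpThresholds h → 360 ≤ h := fun hh => by
    simpa [ebpThresholds] using hlo 1 (by decide) hh
  have l2 : 2 < PySem.List.bisectRight ebpThresholds h → 480 ≤ h := fun hh => by
    simpa [ebpThresholds] using hlo 2 (by decide) hh
  have l3 : 3 < PySem.List.bisectRight ebpThresholds h → 720 ≤ h := fun hh => by
    simpa [ebpThresholds] using hlo 3 (by decide) hh
  have l4 : 4 < PySem.List.bisectRight ebpThresholds h → 1080 ≤ h := fun hh => by
    simpa [ebpThresholds] using hlo 4 (by decide) hh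
  have l5 : 5 < PySem.List.bisectRight ebpThresholds h → 1440 ≤ h := fun hh => by
    simpa [ebpThresholds] using hlo 5 (by decide) hh
  have l6 : 6 < PySem.List.bisectRight ebpThresholds h → 2160 ≤ h := fun hh => by
    simpa [ebpThresholds] using hlo 6 (by decide) hh
  have r0 : PySem.List.bisectRight ebpThresholds h ≤ 0 → h < 240 := fun hh => by
    simpa [ebpThresholds] using hhi 0 (by decide) hh
  have r1 : PySem.List.bisectRight ebpThresholds h ≤ 1 → h < 360 := fun hh => by
    simpa [ebpThresholds] using hhi 1 (by decide) hh
  have r2 : PySem.List.bisectRight ebpThresholds h ≤ 2 → h < 480 := fun hh => by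
    simpa [ebpThresholds] using hhi 2 (by decide) hh
  have r3 : PySem.List.bisectRight ebpThresholds h ≤ 3 → h < 720 := fun hh => by
    simpa [ebpThresholds] using hhi 3 (by decide) hh
  have r4 : PySem.List.bisectRight ebpThresholds h ≤ 4 → h < 1080 := fun hh => by
    simpa [ebpThresholds] using hhi 4 (by decide) hh
  have r5 : PySem.List.bisectRight ebpThresholds h ≤ 5 → h < 1440 := fun hh => by
    simpa [ebpThresholds] using hhi 5 (by decide) hh
  have r6 : PySem.List.bisectRight ebpThresholds h ≤ 6 → h < 2160 := fun hh => by
    simpa [ebpThresholds] using hhi 6 (by decide) hh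
  split_ifs <;> omega

-- ===== VERDICT (by name: the statement is the Claim_ definition above) =====
theorem estimate_bitrate_py_spec : Claim_equal_estimate_bitrate_py := by
  intro height _
  unfold Spec_estimate_bitrate_py estimate_bitrate_py estimate_bitrate_py_alt
  rw [ebp_keys_sorted, ebp_bisect]
  simp only [ebpLoop]
  split_ifs <;> first | decide | omega
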